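-- pv_equiv track=rewrite | github.com/somefo/LEETCODE-Solution | contest/count_subarray_where_max_appear_k.py | countSubarray3
-- ===== SOURCE A (Python) =====
-- from typing import List
--
-- def countSubarray3(nums: List[int], k: int) -> int:
--     # O(n) time complexity
--     res = 0
--     max_num = 0
--     count = 0
--     for num in nums:
--         if num > max_num:
--             max_num = num
--             count = 1
--         elif num == max_num:
--             count += 1
--
--     if count < k:
--         return 0
--     max_num_index = [index for index, val in enumerate(nums) if val == max_num]
--     last_index = len(nums)
--     for i,index in enumerate(max_num_index):
--         if i + k > len(max_num_index):
--             break
--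
--         pre_index = -1 if i == 0 else max_num_index[i-1]
--         res += (index - pre_index) * (last_index - max_num_index[i + k -1])
--
--     return res
-- ===== SOURCE B (Python) =====
-- from typing import List
--
-- def countSubarray3(nums: List[int], k: int) -> int:
--     # One pass: count, per right endpoint, how many left starts give >= k
--     # occurrences of the max (with A's 0-floor on the max).
--     max_num = max(0, max(nums)) if nums else 0
--     res = 0
--     pos = []
--     for i, val in enumerate(nums):
--         if val == max_num:
--             pos.append(i)
--         if len(pos) >= k:
--             res += pos[len(pos) - k] + 1
--     return res
-- ===== Notes on version B (the rewrite author's own statement) =====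
-- stated objective: simpler
-- what changed: B replaces A's two-phase scheme (running max+count, then a product-of-left-gap-times-right-extent sweep over the list of max indices with a break) by a single pass that, per right endpoint, adds the number of valid left starts (pos[len(pos)-k]+1) while collecting max positions.
-- outside the precondition, e.g. on countSubarray3([1], 0): A returns 1, B raises IndexError
import Mathlib
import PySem

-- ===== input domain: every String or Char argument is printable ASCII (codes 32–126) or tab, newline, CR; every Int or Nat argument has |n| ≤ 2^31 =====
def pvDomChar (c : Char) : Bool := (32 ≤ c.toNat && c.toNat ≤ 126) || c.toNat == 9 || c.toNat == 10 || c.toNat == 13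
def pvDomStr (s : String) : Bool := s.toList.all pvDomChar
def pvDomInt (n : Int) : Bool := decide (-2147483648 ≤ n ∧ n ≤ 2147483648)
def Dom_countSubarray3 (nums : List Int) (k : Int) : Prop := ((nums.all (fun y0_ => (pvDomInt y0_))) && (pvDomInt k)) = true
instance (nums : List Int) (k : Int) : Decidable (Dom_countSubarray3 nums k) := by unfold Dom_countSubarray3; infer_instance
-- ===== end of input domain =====

-- B re-counts per right endpoint (one pass collecting max-positions) instead of A's
-- two-phase product-of-gaps sweep over the max-index list; objective: simpler, same O(n).

-- ===== PORT A =====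
-- the first loop of A: running (max_num, count)
def pvAMax : List Int → Int × Int → Int × Int
  | [], s => s
  | v :: rest, s =>
    if v > s.1 then pvAMax rest (v, 1)
    else if v == s.1 then pvAMax rest (s.1, s.2 + 1)
    else pvAMax rest s

-- the comprehension [index for index, val in enumerate(nums) if val == max_num] (counter = enumerate)
def pvPosIdx (m : Int) (i : Nat) : List Int → List Int
  | [] => []
  | v :: rest => (if v == m then [(i : Int)] else []) ++ pvPosIdx m (i + 1) rest

-- A's second loop: 'for i, index in enumerate(max_num_index)' with the break.
-- pyGet? …).getD 0: the Python indexing max_num_index[i-1]/[i+k-1]; inside Pre_ (k ≥ 1)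
-- both indices are always in range, so the default is never used.
def pvALoop (idxs : List Int) (k last : Int) : Nat → List Int → Int → Int
  | _, [], res => res
  | i, idx :: rest, res =>
    if (i : Int) + k > (idxs.length : Int) then res
    else
      let pre : Int := if i = 0 then -1 else (PySem.List.pyGet? idxs ((i : Int) - 1)).getD 0
      pvALoop idxs k last (i + 1) rest
        (res + (idx - pre) * (last - (PySem.List.pyGet? idxs ((i : Int) + k - 1)).getD 0))

def countSubarray3 (nums : List Int) (k : Int) : Int :=
  let s := pvAMax nums (0, 0)
  if s.2 < k then 0
  else
    let idxs := pvPosIdx s.1 0 nums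
    pvALoop idxs k (nums.length : Int) 0 idxs 0

-- ===== PORT B =====
-- max(0, max(nums)) if nums else 0
def pvBMax (nums : List Int) : Int :=
  match PySem.List.max? nums (fun y => y) with
  | none => 0
  | some m => if m > 0 then m else 0

-- B's single pass: state (res, pos); counter = enumerate.
-- pyGet? …).getD 0 is pos[len(pos) - k]; inside Pre_ (k ≥ 1) the index is always in range.
def pvBLoop (mx k : Int) : Nat → List Int → Int × List Int → Int × List Int
  | _, [], s => s
  | i, v :: rest, s =>
    let pos := if v == mx then s.2 ++ [(i : Int)] else s.2
    let res := if (pos.length : Int) ≥ k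
      then s.1 + ((PySem.List.pyGet? pos ((pos.length : Int) - k)).getD 0 + 1)
      else s.1
    pvBLoop mx k (i + 1) rest (res, pos)

def countSubarray3_alt (nums : List Int) (k : Int) : Int :=
  (pvBLoop (pvBMax nums) k 0 nums (0, [])).1

-- ===== PRECONDITION & SPEC =====
-- Pre_ excludes k ≤ 0, where A's returned value is an accident of Python negative-index
-- wraparound (max_num_index[i+k-1] with i+k-1 < 0) and B's own loop raises IndexError.
def Pre_countSubarray3 (nums : List Int) (k : Int) : Prop := 1 ≤ k
instance (nums : List Int) (k : Int) : Decidable (Pre_countSubarray3 nums k) := by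
  unfold Pre_countSubarray3; infer_instance

def pvWitness_countSubarray3 : List Int × Int := ([2, 1, 2], 2)

def Spec_countSubarray3 (nums : List Int) (k : Int) (out : Int) : Prop := out = countSubarray3_alt nums k
instance (nums : List Int) (k : Int) (out : Int) : Decidable (Spec_countSubarray3 nums k out) := by
  unfold Spec_countSubarray3; infer_instance

-- ===== CLAIM (what is proved, stated in full; the proofs are below) =====
def Claim_equal_countSubarray3 : Prop := ∀ (nums : List Int) (k : Int), Dom_countSubarray3 nums k → Pre_countSubarray3 nums k → Spec_countSubarray3 nums k (countSubarray3 nums k)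

-- ===== LEMMAS AND PROOFS =====

-- the closed form both ports are reduced to: A's gap-product sum over the position list
def pvTerm (P : List Int) (n k : Int) (i : Nat) : Int :=
  (P.getD i 0 - (if i = 0 then -1 else P.getD (i - 1) 0)) * (n - P.getD (i + k.toNat - 1) 0)

def pvSA (P : List Int) (n k : Int) : Int :=
  if (P.length : Int) < k then 0
  else ∑ i ∈ Finset.range (P.length - k.toNat + 1), pvTerm P n k i

theorem pvAMax_spec (l : List Int) (a c : Int) :
    pvAMax l (a, c) =
      (l.foldl max a,
       (l.count (l.foldl max a) : Int) + (if l.foldl max a = a then c else 0)) := by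
  induction l generalizing a c with
  | nil => simp [pvAMax]
  | cons v rest ih =>
    have hmax : ∀ b : Int, b ≤ rest.foldl max b := fun b => (PySem.List.le_foldl_max rest b).1
    simp only [pvAMax, List.foldl_cons, List.count_cons]
    by_cases h1 : v > a
    · rw [if_pos (by simpa using h1)]
      rw [ih v 1]
      have hma : max a v = v := by omega
      simp only [hma]
      have hne : rest.foldl max v ≠ a := by have := hmax v; omega
      by_cases h2 : rest.foldl max v = v <;> simp [h2, hne] <;> omega
    · rw [if_neg (by simpa using h1)]
      by_cases h2 : v = a
      · rw [if_pos (by simpa using h2)]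
        rw [ih a (c+1)]
        have hma : max a v = a := by omega
        subst h2
        simp only [hma]
        by_cases h3 : rest.foldl max v = v <;> simp [h3] <;> omega
      · rw [if_neg (by simpa using h2)]
        rw [ih a c]
        have hma : max a v = a := by omega
        simp only [hma]
        have hne : rest.foldl max a = v → False := by
          intro h; have := hmax a; omega
        by_cases h3 : rest.foldl max a = a
        · simp [h3]; exact h2
        · simp [h3]; intro h; exact hne h.symm

theorem pvfoldl_max_comm (a : Int) : ∀ (l : List Int) (b : Int),
    l.foldl max (max a b) = max a (l.foldl max b) := by
  intro l
  induction l with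
  | nil => intro b; rfl
  | cons v rest ih =>
    intro b
    simp only [List.foldl_cons, max_assoc]
    exact ih (max b v)

theorem pvBMax_eq (nums : List Int) : pvBMax nums = nums.foldl max 0 := by
  cases nums with
  | nil => rfl
  | cons x t =>
    simp only [pvBMax, PySem.List.max?_id_cons, List.foldl_cons]
    rw [pvfoldl_max_comm 0 t x, max_def]
    split_ifs <;> omega

theorem pvPosIdx_length (m : Int) : ∀ (l : List Int) (i : Nat),
    (pvPosIdx m i l).length = l.count m := by
  intro l
  induction l with
  | nil => intro i; rfl
  | cons v rest ih =>
    intro i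
    simp only [pvPosIdx, List.count_cons, List.length_append, ih (i+1)]
    by_cases h : v = m <;> simp [h] <;> omega

theorem pvPosIdx_append (m : Int) : ∀ (l : List Int) (i : Nat) (v : Int),
    pvPosIdx m i (l ++ [v]) =
      pvPosIdx m i l ++ (if v == m then [((i + l.length : Nat) : Int)] else []) := by
  intro l
  induction l with
  | nil => intro i v; by_cases h : v = m <;> simp [pvPosIdx, h]
  | cons w rest ih =>
    intro i v
    simp only [List.cons_append, pvPosIdx, ih (i+1) v, List.append_assoc]
    have : i + 1 + rest.length = i + (rest.length + 1) := by omega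
    rw [this]
    simp

-- telescoping: the left-gap factors sum to q t + 1
theorem pvTele (q : ℕ → Int) : ∀ t : ℕ,
    (∑ i ∈ Finset.range (t + 1), (q i - (if i = 0 then -1 else q (i - 1)))) = q t + 1 := by
  intro t
  induction t with
  | zero => simp
  | succ t ih =>
    rw [Finset.sum_range_succ, ih]
    simp
    ring

theorem pvGetD_eq (P : List Int) (j : Nat) (h : j < P.length) :
    (PySem.List.pyGet? P ((j : Nat) : Int)).getD 0 = P.getD j 0 := by
  simp [PySem.List.pyGet?_natCast, List.getD_eq_getElem?_getD]

theorem pvALoop_spec (P : List Int) (k n : Int) (hk : 1 ≤ k) (hkm : k ≤ (P.length : Int)) :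
    ∀ (rest : List Int) (j : Nat) (res : Int), rest = P.drop j →
      pvALoop P k n j rest res =
        res + ∑ i ∈ Finset.range (P.length - k.toNat + 1 - j), pvTerm P n k (j + i) := by
  have hK1 : 1 ≤ k.toNat := by omega
  have hkK : (k.toNat : Int) = k := Int.toNat_of_nonneg (by omega)
  have hKm : k.toNat ≤ P.length := by omega
  intro rest
  induction rest with
  | nil =>
    intro j res hdrop
    have hj : P.length ≤ j := by
      by_contra hc
      push_neg at hc
      exact absurd (List.drop_eq_nil_iff.mp hdrop.symm) (by omega)
    have : P.length - k.toNat + 1 - j = 0 := by omega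
    simp [pvALoop, this]
  | cons idx rest' ih =>
    intro j res hdrop
    have hj : j < P.length := by
      by_contra hc
      push_neg at hc
      rw [List.drop_eq_nil_of_le hc] at hdrop
      simp at hdrop
    by_cases hbr : (j : Int) + k > (P.length : Int)
    · have h0 : P.length - k.toNat + 1 - j = 0 := by omega
      simp only [pvALoop, if_pos hbr, h0]
      simp
    · push_neg at hbr
      have hdrop' : rest' = P.drop (j + 1) := by
        have := congrArg (List.drop 1) hdrop
        simpa [List.drop_drop, Nat.add_comm] using this
      have hidx : idx = P.getD j 0 := by
        have h0 := congrArg (fun l => l.getD 0 0) hdrop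
        simpa [List.getD_eq_getElem?_getD, List.getElem?_drop] using h0
      have hterm :
          (idx - (if j = 0 then (-1 : Int) else (PySem.List.pyGet? P ((j : Int) - 1)).getD 0)) *
              (n - (PySem.List.pyGet? P ((j : Int) + k - 1)).getD 0) = pvTerm P n k j := by
        have h2 : (j : Int) + k - 1 = ((j + k.toNat - 1 : Nat) : Int) := by push_cast; omega
        have h2' : (PySem.List.pyGet? P ((j : Int) + k - 1)).getD 0 = P.getD (j + k.toNat - 1) 0 := by
          rw [h2, pvGetD_eq P _ (by omega)]
        rw [h2']
        by_cases hj0 : j = 0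
        · simp [pvTerm, hj0, hidx]
        · have h1 : (j : Int) - 1 = ((j - 1 : Nat) : Int) := by push_cast [Nat.cast_sub (by omega : 1 ≤ j)]; ring
          have h1' : (PySem.List.pyGet? P ((j : Int) - 1)).getD 0 = P.getD (j - 1) 0 := by
            rw [h1, pvGetD_eq P _ (by omega)]
          rw [h1']
          simp [pvTerm, hj0, hidx]
      have hsplit : P.length - k.toNat + 1 - j = (P.length - k.toNat + 1 - (j + 1)) + 1 := by omega
      simp only [pvALoop]
      rw [if_neg (by omega)]
      rw [ih (j + 1) _ hdrop', hsplit, Finset.sum_range_succ']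
      simp only [Nat.add_zero]
      rw [hterm]
      have : ∀ i, j + 1 + i = j + (i + 1) := by omega
      simp only [this]
      ring

-- the one-step increment of the closed form when one element is appended to nums
theorem pvGetD_concat (P : List Int) (x : Int) : (P ++ [x]).getD P.length 0 = x := by
  simp [List.getD_eq_getElem?_getD]

theorem pvSA_step (P : List Int) (n k : Int) (hk : 1 ≤ k) (occ : Bool)
    (P' : List Int) (hP' : P' = P ++ (if occ then [n] else [])) :
    pvSA P' (n + 1) k =
      pvSA P n k +
        (if (P'.length : Int) ≥ k then P'.getD (P'.length - k.toNat) 0 + 1 else 0) := by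
  have hkK : (k.toNat : Int) = k := Int.toNat_of_nonneg (by omega)
  have hK1 : 1 ≤ k.toNat := by omega
  cases occ with
  | false =>
    simp only [Bool.false_eq_true, if_false, List.append_nil] at hP'
    rw [hP']
    by_cases hm : (P.length : Int) < k
    · rw [pvSA, pvSA, if_pos hm, if_pos hm, if_neg (by omega)]
      simp
    · rw [pvSA, pvSA, if_neg hm, if_neg hm, if_pos (by omega)]
      have hsum : ∀ i ∈ Finset.range (P.length - k.toNat + 1),
          pvTerm P (n + 1) k i =
            pvTerm P n k i + (P.getD i 0 - (if i = 0 then -1 else P.getD (i - 1) 0)) := by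
        intro i _
        unfold pvTerm
        ring
      rw [Finset.sum_congr rfl hsum, Finset.sum_add_distrib,
        pvTele (fun j => P.getD j 0) (P.length - k.toNat)]
  | true =>
    simp only [if_true] at hP'
    have hm' : P'.length = P.length + 1 := by simp [hP']
    have hq : ∀ j, j < P.length → P'.getD j 0 = P.getD j 0 := by
      intro j hj
      rw [hP']
      exact List.getD_append _ _ _ _ hj
    by_cases h1 : (P.length : Int) + 1 < k
    · rw [pvSA, pvSA, if_pos (by omega), if_pos (by push_cast [hm']; omega), if_neg (by push_cast [hm']; omega)]
      simp
    · by_cases h2 : (P.length : Int) < k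
      · have hmK : P.length + 1 = k.toNat := by omega
        rw [pvSA, pvSA, if_pos h2, if_neg (by push_cast [hm']; omega), if_pos (by push_cast [hm']; omega)]
        have hr : P'.length - k.toNat + 1 = 1 := by omega
        rw [hr, Finset.sum_range_one]
        have h0 : P'.length - k.toNat = 0 := by omega
        rw [h0]
        unfold pvTerm
        rw [if_pos rfl]
        have h3 : 0 + k.toNat - 1 = P.length := by omega
        rw [h3, hP', pvGetD_concat]
        ring
      · have hge : k ≤ (P.length : Int) := by omega
        rw [pvSA, pvSA, if_neg h2, if_neg (by push_cast [hm']; omega), if_pos (by push_cast [hm']; omega)]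
        have hr : P'.length - k.toNat + 1 = (P.length - k.toNat + 1) + 1 := by omega
        rw [hr, Finset.sum_range_succ]
        have hsum : ∀ i ∈ Finset.range (P.length - k.toNat + 1),
            pvTerm P' (n + 1) k i =
              pvTerm P n k i + (P.getD i 0 - (if i = 0 then -1 else P.getD (i - 1) 0)) := by
          intro i hi
          simp only [Finset.mem_range] at hi
          unfold pvTerm
          rw [hq i (by omega), hq (i - 1) (by omega), hq (i + k.toNat - 1) (by omega)]
          ring
        rw [Finset.sum_congr rfl hsum, Finset.sum_add_distrib,
          pvTele (fun j => P.getD j 0) (P.length - k.toNat)]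
        have hlast : pvTerm P' (n + 1) k (P.length - k.toNat + 1) =
            P'.getD (P.length - k.toNat + 1) 0 - P.getD (P.length - k.toNat) 0 := by
          unfold pvTerm
          rw [if_neg (by omega : ¬(P.length - k.toNat + 1 = 0))]
          have h3 : P.length - k.toNat + 1 + k.toNat - 1 = P.length := by omega
          have h4 : P.length - k.toNat + 1 - 1 = P.length - k.toNat := by omega
          rw [h3, h4, hq (P.length - k.toNat) (by omega)]
          rw [hP', pvGetD_concat]
          ring
        have h5 : P'.length - k.toNat = P.length - k.toNat + 1 := by omega
        rw [hlast, h5]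
        ring

theorem pvBLoop_append (mx k : Int) (v : Int) : ∀ (l : List Int) (i : Nat) (s : Int × List Int),
    pvBLoop mx k i (l ++ [v]) s = pvBLoop mx k (i + l.length) [v] (pvBLoop mx k i l s) := by
  intro l
  induction l with
  | nil => intro i s; simp [pvBLoop]
  | cons w rest ih =>
    intro i s
    simp only [List.cons_append, pvBLoop, ih (i+1)]
    have : i + 1 + rest.length = i + (rest.length + 1) := by omega
    rw [this]
    rfl

theorem pvBLoop_pos (mx k : Int) : ∀ (l : List Int) (i : Nat) (s : Int × List Int),
    (pvBLoop mx k i l s).2 = s.2 ++ pvPosIdx mx i l := by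
  intro l
  induction l with
  | nil => intro i s; simp [pvBLoop, pvPosIdx]
  | cons w rest ih =>
    intro i s
    simp only [pvBLoop, ih (i+1), pvPosIdx]
    by_cases h : w = mx <;> simp [h]

theorem pvBLoop_spec (mx k : Int) (hk : 1 ≤ k) : ∀ (l : List Int),
    (pvBLoop mx k 0 l (0, [])).1 = pvSA (pvPosIdx mx 0 l) (l.length : Int) k := by
  intro l
  induction l using List.reverseRecOn with
  | nil =>
    rw [pvSA, if_pos (by simp; omega)]
    rfl
  | append_singleton l v ih =>
    rw [pvBLoop_append]
    have hpos : (pvBLoop mx k 0 l (0, [])).2 = pvPosIdx mx 0 l := by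
      simpa using pvBLoop_pos mx k l 0 (0, [])
    have hstep : (pvBLoop mx k (0 + l.length) [v] (pvBLoop mx k 0 l (0, []))).1 =
        (let pos := if v == mx then pvPosIdx mx 0 l ++ [((l.length : Nat) : Int)]
                    else pvPosIdx mx 0 l;
         if (pos.length : Int) ≥ k
           then (pvBLoop mx k 0 l (0, [])).1 +
             ((PySem.List.pyGet? pos ((pos.length : Int) - k)).getD 0 + 1)
           else (pvBLoop mx k 0 l (0, [])).1) := by
      simp only [pvBLoop, hpos, Nat.zero_add]
    rw [hstep, ih]
    have hP' : pvPosIdx mx 0 (l ++ [v]) =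
        pvPosIdx mx 0 l ++ (if v == mx then [((l.length : Nat) : Int)] else []) := by
      simpa using pvPosIdx_append mx l 0 v
    have hstep2 := pvSA_step (pvPosIdx mx 0 l) (l.length : Int) k hk (v == mx)
      (pvPosIdx mx 0 (l ++ [v])) (by rw [hP'])
    have hlen : (((l ++ [v]).length : Nat) : Int) = (l.length : Int) + 1 := by
      simp
    rw [hlen, hstep2]
    set P' := pvPosIdx mx 0 (l ++ [v]) with hP'def
    have hposeq : (if v == mx then pvPosIdx mx 0 l ++ [((l.length : Nat) : Int)]
        else pvPosIdx mx 0 l) = P' := by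
      rw [hP']
      by_cases h : v = mx <;> simp [h]
    rw [hposeq]
    by_cases hge : (P'.length : Int) ≥ k
    · rw [if_pos hge, if_pos hge]
      have hidx : (P'.length : Int) - k = ((P'.length - k.toNat : Nat) : Int) := by
        push_cast [Int.toNat_of_nonneg (by omega : (0:Int) ≤ k)]
        omega
      rw [hidx, pvGetD_eq P' _ (by omega)]
    · rw [if_neg hge, if_neg hge]
      ring

-- ===== VERDICT (by name: the statement is the Claim_ definition above) =====
theorem countSubarray3_spec : Claim_equal_countSubarray3 := by
  unfold Claim_equal_countSubarray3
  intro nums k _hdom hpre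
  have hk : 1 ≤ k := hpre
  unfold Spec_countSubarray3 countSubarray3 countSubarray3_alt
  rw [pvBMax_eq, pvBLoop_spec _ _ hk nums]
  have h0 : pvAMax nums (0, 0) = (nums.foldl max 0, (nums.count (nums.foldl max 0) : Int)) := by
    rw [pvAMax_spec]
    split_ifs <;> simp
  simp only [h0]
  set M := nums.foldl max 0 with hM
  set P := pvPosIdx M 0 nums with hP
  have hlen : P.length = nums.count M := pvPosIdx_length M nums 0
  by_cases hcnt : ((nums.count M : Nat) : Int) < k
  · rw [if_pos hcnt, pvSA, if_pos (by rw [hlen]; exact hcnt)]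
  · rw [if_neg hcnt]
    rw [pvALoop_spec P k (nums.length : Int) hk (by rw [hlen]; omega) P 0 0 (by simp)]
    rw [pvSA, if_neg (by rw [hlen]; exact hcnt)]
    simp
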